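-- pv_equiv track=rewrite | github.com/Shuumie/Card-Separator | Separate Pictures.py | find_columns_over_luminance_threshold
-- ===== SOURCE A (Python) =====
-- def find_columns_over_luminance_threshold(threshold, image_luminance_values):
--     width, height = len(image_luminance_values), len(image_luminance_values[0])
--     image_luminance_over_threshold = check_image_luminance_threshold(threshold, image_luminance_values)
--     result = []
--     for x in range(width):
--         check_passed = True
--         for y in range(height):
--             check_passed &= image_luminance_over_threshold[x][y]
--         if check_passed:
--             result.append(x)
--     return result
--
-- def check_image_luminance_threshold(threshold, image_luminance_values):
--     width, height = len(image_luminance_values), len(image_luminance_values[0])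
--     result = [[0] * height for _ in range(width)]
--     for x in range(width):
--         for y in range(height):
--             result[x][y] = check_luminance_threshold(threshold, image_luminance_values[x][y])
--
--     return result
--
-- def check_luminance_threshold(threshold, pixel_luminocity):
--     return pixel_luminocity >= threshold
-- ===== SOURCE B (Python) =====
-- def find_columns_over_luminance_threshold(threshold, image_luminance_values):
--     width = len(image_luminance_values)
--     height = len(image_luminance_values[0])
--     return [x for x in range(width)
--             if all(image_luminance_values[x][y] >= threshold for y in range(height))]
-- ===== Notes on version B (the rewrite author's own statement) =====
-- stated objective: simpler
-- what changed: Dropped the full boolean-matrix-building pass (check_image_luminance_threshold) and the accumulate-with-&= inner loop; B is a single fused comprehension that short-circuits per column with all().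
import Mathlib
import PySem

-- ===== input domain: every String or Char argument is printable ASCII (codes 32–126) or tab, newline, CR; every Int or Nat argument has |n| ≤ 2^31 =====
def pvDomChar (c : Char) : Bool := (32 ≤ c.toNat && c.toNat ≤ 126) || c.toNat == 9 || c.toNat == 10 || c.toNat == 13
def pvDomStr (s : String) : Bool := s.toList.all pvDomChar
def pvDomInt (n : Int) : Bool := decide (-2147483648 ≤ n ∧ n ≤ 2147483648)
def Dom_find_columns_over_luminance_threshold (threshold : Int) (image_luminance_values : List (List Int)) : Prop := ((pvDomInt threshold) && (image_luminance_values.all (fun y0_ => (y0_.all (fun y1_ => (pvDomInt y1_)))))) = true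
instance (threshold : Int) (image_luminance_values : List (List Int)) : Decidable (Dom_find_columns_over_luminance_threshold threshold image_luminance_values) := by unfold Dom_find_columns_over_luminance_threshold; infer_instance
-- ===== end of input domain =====

-- B replaces A's two-pass "build boolean matrix, then scan it column by column with &="
-- by a single fused comprehension that short-circuits per column (objective: simpler).


-- ===== PORT A =====
def check_luminance_threshold (threshold : Int) (pixel_luminocity : Int) : Bool :=
  pixel_luminocity ≥ threshold

-- builds result[x][y] = check_luminance_threshold threshold image[x][y]; the [[0]*height]
-- zero-initialisation is fully overwritten in Python, so the matrix is built entry by entry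
def check_image_luminance_threshold (threshold : Int) (image_luminance_values : List (List Int)) : List (List Bool) :=
  let width := image_luminance_values.length
  let height := (PySem.List.pyGetD image_luminance_values 0 []).length
  (List.range width).map (fun (x : Nat) =>
    (List.range height).map (fun (y : Nat) =>
      check_luminance_threshold threshold
        (PySem.List.pyGetD (PySem.List.pyGetD image_luminance_values (x : Int) []) (y : Int) 0)))

def find_columns_over_luminance_threshold (threshold : Int) (image_luminance_values : List (List Int)) : List Int :=
  let width := image_luminance_values.length
  let height := (PySem.List.pyGetD image_luminance_values 0 []).length
  let image_luminance_over_threshold := check_image_luminance_threshold threshold image_luminance_values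
  (List.range width).foldl (fun (result : List Int) (x : Nat) =>
    let check_passed := (List.range height).foldl (fun (b : Bool) (y : Nat) =>
      b && PySem.List.pyGetD (PySem.List.pyGetD image_luminance_over_threshold (x : Int) []) (y : Int) false) true
    if check_passed then result ++ [(x : Int)] else result) []

-- ===== PORT B =====
def find_columns_over_luminance_threshold_alt (threshold : Int) (image_luminance_values : List (List Int)) : List Int :=
  let width := image_luminance_values.length
  let height := (PySem.List.pyGetD image_luminance_values 0 []).length
  ((List.range width).filter (fun (x : Nat) =>
    (List.range height).all (fun (y : Nat) =>
      PySem.List.pyGetD (PySem.List.pyGetD image_luminance_values (x : Int) []) (y : Int) 0 ≥ threshold))).map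
    (fun (x : Nat) => (x : Int))

-- ===== PRECONDITION & SPEC =====
-- Python A raises IndexError on an empty image (len(image[0])) and on ragged images with a
-- row shorter than row 0 (the [x][y] indexing); exactly those inputs are excluded.
def Pre_find_columns_over_luminance_threshold (threshold : Int) (image_luminance_values : List (List Int)) : Prop :=
  image_luminance_values ≠ [] ∧
  ∀ row ∈ image_luminance_values, (image_luminance_values.headD []).length ≤ row.length
instance (threshold : Int) (image_luminance_values : List (List Int)) : Decidable (Pre_find_columns_over_luminance_threshold threshold image_luminance_values) := by unfold Pre_find_columns_over_luminance_threshold; infer_instance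

def pvWitness_find_columns_over_luminance_threshold : Int × List (List Int) := (2, [[1, 3], [2, 4]])

def Spec_find_columns_over_luminance_threshold (threshold : Int) (image_luminance_values : List (List Int)) (out : List Int) : Prop := out = find_columns_over_luminance_threshold_alt threshold image_luminance_values
instance (threshold : Int) (image_luminance_values : List (List Int)) (out : List Int) : Decidable (Spec_find_columns_over_luminance_threshold threshold image_luminance_values out) := by unfold Spec_find_columns_over_luminance_threshold; infer_instance

-- ===== CLAIM (what is proved, stated in full; the proofs are below) =====
def Claim_equal_find_columns_over_luminance_threshold : Prop := ∀ (threshold : Int) (image_luminance_values : List (List Int)), Dom_find_columns_over_luminance_threshold threshold image_luminance_values → Pre_find_columns_over_luminance_threshold threshold image_luminance_values → Spec_find_columns_over_luminance_threshold threshold image_luminance_values (find_columns_over_luminance_threshold threshold image_luminance_values)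

-- ===== LEMMAS AND PROOFS =====

theorem pv_all_congr {l : List Nat} {p q : Nat → Bool} (h : ∀ x ∈ l, p x = q x) :
    l.all p = l.all q := by
  induction l with
  | nil => rfl
  | cons a l ih =>
    simp only [List.all_cons, h a (List.mem_cons_self), ih (fun x hx => h x (List.mem_cons_of_mem a hx))]

-- an &=-accumulating fold over a list equals Bool.and of the start with .all
theorem pv_foldl_and (f : Nat → Bool) (l : List Nat) (b : Bool) :
    l.foldl (fun b y => b && f y) b = (b && l.all f) := by
  induction l generalizing b with
  | nil => simp
  | cons a l ih => simp [List.foldl_cons, ih, Bool.and_assoc]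

theorem find_columns_pointwise (threshold : Int) (img : List (List Int)) :
    find_columns_over_luminance_threshold threshold img
      = find_columns_over_luminance_threshold_alt threshold img := by
  unfold find_columns_over_luminance_threshold find_columns_over_luminance_threshold_alt
  simp only []
  rw [PySem.List.foldl_append_if
      (p := fun x : Nat => (List.range (PySem.List.pyGetD img 0 []).length).foldl (fun (b : Bool) (y : Nat) =>
        b && PySem.List.pyGetD (PySem.List.pyGetD (check_image_luminance_threshold threshold img) (x : Int) []) (y : Int) false) true)
      (f := fun x : Nat => (x : Int))]
  simp only [List.nil_append]
  refine congrArg (List.map (fun (x : Nat) => (x : Int))) ?_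
  apply List.filter_congr
  intro x hx
  rw [List.mem_range] at hx
  rw [pv_foldl_and, Bool.true_and]
  apply pv_all_congr
  intro y hy
  rw [List.mem_range] at hy
  simp only [check_image_luminance_threshold, PySem.List.pyGetD_natCast,
    List.getD_eq_getElem?_getD, List.getElem?_map, List.getElem?_range, hx, hy,
    Option.map_some, Option.getD_some, check_luminance_threshold]

-- ===== VERDICT (by name: the statement is the Claim_ definition above) =====
theorem find_columns_over_luminance_threshold_spec : Claim_equal_find_columns_over_luminance_threshold := by
  intro threshold img _ _
  exact find_columns_pointwise threshold img
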